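-- pv_equiv track=rewrite | github.com/pgmeiner/iacm | iacm/meta_data.py | replace_char_by_char
-- ===== SOURCE A (Python) =====
-- def replace_char_by_char(char_to_replaced, str_to_be_replaced, to_be_inserted_str):
--     replace_index = 0
--     final_str = ''
--     for i, c in enumerate(str_to_be_replaced):
--         if c == char_to_replaced:
--             final_str = final_str + to_be_inserted_str[replace_index]
--             replace_index = replace_index + 1
--         else:
--             final_str = final_str + c
--
--     return final_str
-- ===== SOURCE B (Python) =====
-- def replace_char_by_char(char_to_replaced, str_to_be_replaced, to_be_inserted_str):
--     positions = [i for i, c in enumerate(str_to_be_replaced) if c == char_to_replaced]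
--     result = list(str_to_be_replaced)
--     for j, p in enumerate(positions):
--         result[p] = to_be_inserted_str[j]
--     return ''.join(result)
-- ===== Notes on version B (the rewrite author's own statement) =====
-- stated objective: alternative
-- what changed: Two-pass rewrite: first collect the match positions, then overwrite them in a mutable char list and join once, instead of growing a string by repeated concatenation while counting matches.
import Mathlib
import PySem

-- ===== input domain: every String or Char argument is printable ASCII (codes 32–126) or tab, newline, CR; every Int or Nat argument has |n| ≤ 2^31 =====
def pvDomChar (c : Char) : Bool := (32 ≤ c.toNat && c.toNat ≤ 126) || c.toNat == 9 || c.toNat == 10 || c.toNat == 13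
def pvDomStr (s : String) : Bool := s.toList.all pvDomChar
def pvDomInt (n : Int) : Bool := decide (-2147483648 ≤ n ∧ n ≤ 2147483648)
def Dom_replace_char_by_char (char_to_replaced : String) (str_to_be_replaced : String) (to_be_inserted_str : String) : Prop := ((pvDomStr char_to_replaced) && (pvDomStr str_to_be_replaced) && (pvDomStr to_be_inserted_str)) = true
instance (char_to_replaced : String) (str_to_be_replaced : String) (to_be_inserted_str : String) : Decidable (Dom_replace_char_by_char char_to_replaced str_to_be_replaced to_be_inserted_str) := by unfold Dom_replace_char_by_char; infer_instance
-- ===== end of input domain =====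

-- B replaces A's single pass that grows a string by repeated concatenation with a two-pass
-- version (collect match positions, then overwrite them in a char list and join once):
-- an alternative decomposition of the same cost, same return value wherever A returns.

-- ===== PORT A =====
-- literal port of A: fold over the string with state (replace_index, final_str);
-- to_be_inserted_str[replace_index] is pyGet? (none = IndexError, excluded by Pre_; getD ' ' is never used inside Pre_)
def replace_char_by_char (char_to_replaced : String) (str_to_be_replaced : String) (to_be_inserted_str : String) : String :=
  let fin := str_to_be_replaced.toList.foldl
    (fun (st : Int × List Char) c =>
      if String.mk [c] == char_to_replaced then
        (st.1 + 1, st.2 ++ [(PySem.Str.pyGet? to_be_inserted_str st.1).getD ' '])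
      else
        (st.1, st.2 ++ [c]))
    (0, [])
  String.mk fin.2

-- ===== PORT B =====
-- literal port of Source B: positions of matches, then overwrite them in a copy of the char list
def replace_char_by_char_alt (char_to_replaced : String) (str_to_be_replaced : String) (to_be_inserted_str : String) : String :=
  let positions := ((PySem.List.enumerate str_to_be_replaced.toList).filter
      (fun ic => String.mk [ic.2] == char_to_replaced)).map (·.1)
  let result := (PySem.List.enumerate positions).foldl
      (fun (r : List Char) jp => r.set jp.2.toNat ((PySem.Str.pyGet? to_be_inserted_str jp.1).getD ' '))
      str_to_be_replaced.toList
  String.mk result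

-- ===== PRECONDITION & SPEC =====
-- Pre_ excludes exactly the inputs on which A (and B alike) raises IndexError:
-- more matched characters than replacement characters.
def Pre_replace_char_by_char (char_to_replaced : String) (str_to_be_replaced : String) (to_be_inserted_str : String) : Prop :=
  str_to_be_replaced.toList.countP (fun c => String.mk [c] == char_to_replaced) ≤ to_be_inserted_str.toList.length
instance (char_to_replaced : String) (str_to_be_replaced : String) (to_be_inserted_str : String) : Decidable (Pre_replace_char_by_char char_to_replaced str_to_be_replaced to_be_inserted_str) := by unfold Pre_replace_char_by_char; infer_instance

def pvWitness_replace_char_by_char : String × String × String := ("a", "banana", "123")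

def Spec_replace_char_by_char (char_to_replaced : String) (str_to_be_replaced : String) (to_be_inserted_str : String) (out : String) : Prop := out = replace_char_by_char_alt char_to_replaced str_to_be_replaced to_be_inserted_str
instance (char_to_replaced : String) (str_to_be_replaced : String) (to_be_inserted_str : String) (out : String) : Decidable (Spec_replace_char_by_char char_to_replaced str_to_be_replaced to_be_inserted_str out) := by unfold Spec_replace_char_by_char; infer_instance

-- ===== CLAIM (what is proved, stated in full; the proofs are below) =====
def Claim_equal_replace_char_by_char : Prop := ∀ (char_to_replaced : String) (str_to_be_replaced : String) (to_be_inserted_str : String), Dom_replace_char_by_char char_to_replaced str_to_be_replaced to_be_inserted_str → Pre_replace_char_by_char char_to_replaced str_to_be_replaced to_be_inserted_str → Spec_replace_char_by_char char_to_replaced str_to_be_replaced to_be_inserted_str (replace_char_by_char char_to_replaced str_to_be_replaced to_be_inserted_str)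

-- ===== LEMMAS AND PROOFS =====

-- reference function: the intended result with the replacement counter threaded structurally
def pvRepl (ctr ins : String) : Int → List Char → List Char
  | _, [] => []
  | k, c :: t =>
      if String.mk [c] == ctr then ((PySem.Str.pyGet? ins k).getD ' ') :: pvRepl ctr ins (k+1) t
      else c :: pvRepl ctr ins k t

lemma pvA_fold (ctr ins : String) :
    ∀ (t : List Char) (k : Int) (acc : List Char),
      (t.foldl
        (fun (st : Int × List Char) c =>
          if String.mk [c] == ctr then
            (st.1 + 1, st.2 ++ [(PySem.Str.pyGet? ins st.1).getD ' '])
          else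
            (st.1, st.2 ++ [c]))
        (k, acc)).2 = acc ++ pvRepl ctr ins k t := by
  intro t
  induction t with
  | nil => intro k acc; simp [pvRepl]
  | cons c t ih =>
      intro k acc
      simp only [List.foldl_cons]
      by_cases h : (String.mk [c] == ctr) = true
      · rw [if_pos h, ih]
        simp [pvRepl, h]
      · rw [if_neg h, ih]
        simp [pvRepl, h]

lemma pvB_fold (ctr ins : String) :
    ∀ (t : List Char) (pre : List Char) (k : Int),
      (PySem.List.enumerate
          (((PySem.List.enumerate t (pre.length : Int)).filter
              (fun ic => String.mk [ic.2] == ctr)).map (·.1)) k).foldl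
        (fun (r : List Char) jp => r.set jp.2.toNat ((PySem.Str.pyGet? ins jp.1).getD ' '))
        (pre ++ t)
      = pre ++ pvRepl ctr ins k t := by
  intro t
  induction t with
  | nil => intro pre k; simp [pvRepl, PySem.List.enumerate_nil]
  | cons c t ih =>
      intro pre k
      rw [PySem.List.enumerate_cons, List.filter_cons]
      by_cases h : (String.mk [c] == ctr) = true
      · rw [if_pos h, List.map_cons]
        rw [PySem.List.enumerate_cons]
        simp only [List.foldl_cons]
        have hset : (pre ++ c :: t).set (Int.toNat (pre.length : Int))
            ((PySem.Str.pyGet? ins k).getD ' ')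
            = (pre ++ [(PySem.Str.pyGet? ins k).getD ' ']) ++ t := by
          simp
        rw [hset]
        have hh := ih (pre ++ [(PySem.Str.pyGet? ins k).getD ' ']) (k + 1)
        have hlen : (((pre ++ [(PySem.Str.pyGet? ins k).getD ' ']).length : Nat) : Int)
            = (pre.length : Int) + 1 := by
          simp
        rw [hlen] at hh
        rw [hh]
        simp [pvRepl, h]
      · rw [if_neg h]
        have hl : pre ++ c :: t = (pre ++ [c]) ++ t := by simp
        rw [hl]
        have hh := ih (pre ++ [c]) k
        have hlen : (((pre ++ [c]).length : Nat) : Int) = (pre.length : Int) + 1 := by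
          simp
        rw [hlen] at hh
        rw [hh]
        simp [pvRepl, h]

-- ===== VERDICT (by name: the statement is the Claim_ definition above) =====
theorem replace_char_by_char_spec : Claim_equal_replace_char_by_char := by
  intro ctr s ins _ _
  unfold Spec_replace_char_by_char replace_char_by_char replace_char_by_char_alt
  have hA := pvA_fold ctr ins s.toList 0 []
  have hB := pvB_fold ctr ins s.toList [] 0
  simp only [List.length_nil, Nat.cast_zero, List.nil_append] at hA hB
  simp only [hA, hB]
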